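-- pv_equiv track=rewrite | github.com/SemRoCo/giskardpy | src/giskardpy/utils/config_loader.py | get_namespaces
-- ===== SOURCE A (Python) =====
-- def get_namespaces(d, namespace_seperator='/'):
--     """
--     This function tries to find namespaces in the given dictionary by searching its top level keys
--     for the namespace_seperator. Moreover, the prefix entry in the values is checked too (see example below).
--     Therefore, a namespace is registered if it is specified in the top level key name or in the value part
--     with the key word 'prefix'.
--     If no namespaces are found a list is returned holding as many empty strings entries as top level keys
--     exist in the given dictionary.
--
--     Valid dict with namespacing:
--         dict = {
--         namespace1/something:
--             something: 2
--             other: 1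
--             prefix: namespace1 (optional)
--         something:
--             ...
--             prefix: namespace2 (optional)
--         /something:
--             ...
--             prefix: namespace3 (optional)
--         /namespace4/something: (also okay)
--             ...
--             prefix: namespace4 (optional)
--         }
--
--     :type d: dict
--     :type namespace_seperator: str
--     :rtype: list of str
--     """
--     single_robot_namespace = ''
--     no_namespaces = list()
--     namespaces = list()
--     for i, (key_name, values) in enumerate(d.items()):
--         prefix_namespace = None
--         name_namespace = None
--
--         # Namespacing by specifying the prefix keyword
--         if 'prefix' in values:
--             prefix_namespace = values['prefix']
--
--         # Namespacing by the action server name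
--         # Namespacing: e.g. pr2_a/base
--         if key_name.count(namespace_seperator) > 0:
--             if key_name.count(namespace_seperator) == 1:
--                 pass
--             # Namespacing: e.g. /pr2_a/base
--             elif key_name.count(namespace_seperator) == 2 and \
--                     key_name.index(namespace_seperator) == 0:
--                 key_name = key_name[1:]
--             else:
--                 raise Exception('{} is an invalid combination of a namespace and'
--                                 ' the action server name.'.format(key_name))
--             name_namespace = key_name[:key_name.index(namespace_seperator)]
--             if name_namespace == single_robot_namespace:
--                 name_namespace = None
--
--         # Check prefix_namespace with the namespace in the action server name
--         if prefix_namespace is None and name_namespace is None: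
--             no_namespaces.append(key_name)
--             continue
--         else:
--             if prefix_namespace is not None:
--                 if name_namespace is None:
--                     namespaces.append(prefix_namespace)
--                 elif prefix_namespace != name_namespace:
--                     raise ('Prefix namespace {} differs from the namespace specified '
--                             'in the action server name {}'.format(prefix_namespace, name_namespace))
--                 else:
--                     namespaces.append(prefix_namespace)
--             else:
--                 namespaces.append(name_namespace)
--
--     if len(namespaces) == 0:
--         namespaces = [single_robot_namespace] * len(d.items())
--     elif len(namespaces) != len(d.items()):
--         raise Exception('The entries {} have no namespacing but the others do.'.format(str(no_namespaces)))
--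
--     return namespaces
-- ===== SOURCE B (Python) =====
-- def _name(k, sep):
--     """Namespace encoded in a (valid) key name, or None."""
--     if k.count(sep) == 0:
--         return None
--     if k.count(sep) == 2:
--         k = k[1:]
--     return k[:k.find(sep)] or None
--
--
-- def get_namespaces(d, namespace_seperator='/'):
--     """Staged whole-list passes: validate every key, build the parallel lists
--     of key-name namespaces and prefix entries, reject clashes via zip, merge,
--     then aggregate by counting the un-namespaced entries."""
--     sep = namespace_seperator
--     keys = list(d)
--
--     bad = [k for k in keys
--            if not (k.count(sep) <= 1 or (k.count(sep) == 2 and k.startswith(sep)))]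
--     if bad:
--         raise Exception('{} is an invalid combination of a namespace and'
--                         ' the action server name.'.format(bad[0]))
--
--     names = [_name(k, sep) for k in keys]
--     prefixes = [v.get('prefix') for v in d.values()]
--
--     clash = [(p, n) for p, n in zip(prefixes, names)
--              if p is not None and n is not None and p != n]
--     if clash:
--         raise Exception('Prefix namespace {} differs from the namespace specified '
--                         'in the action server name {}'.format(*clash[0]))
--
--     merged = [n if p is None else p for p, n in zip(prefixes, names)]
--     if merged.count(None) == len(merged):
--         return [''] * len(merged)
--     if None in merged:
--         raise Exception('The entries {} have no namespacing but the others do.'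
--                         .format(str([k for k, m in zip(keys, merged) if m is None])))
--     return merged
-- ===== Notes on version B (the rewrite author's own statement) =====
-- stated objective: alternative
-- what changed: B replaces A's single interleaved loop with two growing accumulator lists (no_namespaces/namespaces, continue, final length comparison) by staged whole-list passes: validate all keys up front, build parallel names/prefixes lists, detect prefix clashes with a zip-filter, merge the two lists positionally, and aggregate by counting None entries.
import Mathlib
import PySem

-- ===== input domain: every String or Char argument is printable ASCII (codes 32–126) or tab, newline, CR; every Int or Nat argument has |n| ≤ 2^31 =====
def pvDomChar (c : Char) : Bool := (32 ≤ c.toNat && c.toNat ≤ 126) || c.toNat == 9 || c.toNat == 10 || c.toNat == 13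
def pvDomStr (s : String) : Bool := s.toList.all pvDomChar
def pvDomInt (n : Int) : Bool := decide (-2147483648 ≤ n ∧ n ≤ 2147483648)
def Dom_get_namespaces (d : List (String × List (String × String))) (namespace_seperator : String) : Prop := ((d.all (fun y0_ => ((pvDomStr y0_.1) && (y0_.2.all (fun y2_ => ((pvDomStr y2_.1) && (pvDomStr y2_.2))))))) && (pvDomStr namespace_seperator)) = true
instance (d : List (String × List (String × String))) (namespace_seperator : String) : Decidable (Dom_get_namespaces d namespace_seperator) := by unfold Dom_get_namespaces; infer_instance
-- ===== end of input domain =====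

-- B replaces A's single loop with two growing accumulators by staged whole-list passes
-- (validate keys, build parallel names/prefixes lists, zip-filter clashes, merge, count-aggregate);
-- objective: alternative, same cost. Both ports read the dict argument through PySem.Dict.ofList
-- (last duplicate key wins), as Python builds the dict before either function sees it.

-- ===== PORT A =====
-- key_name after A's reassignment; none = raise Exception('... invalid combination ...')
def keyResA (key sep : String) : Option String :=
  if 0 < PySem.Str.count key sep then
    if PySem.Str.count key sep = 1 then some key
    else if PySem.Str.count key sep = 2 ∧ PySem.Str.find key sep = 0 then
      some (PySem.Str.slice key (some 1) none)
    else none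
  else some key

-- name_namespace computed from the (reassigned) key1, guarded by the original count
def nameA (c : Nat) (key1 sep : String) : Option String :=
  if 0 < c then
    if PySem.Str.slice key1 none (some (PySem.Str.find key1 sep)) = "" then none
    else some (PySem.Str.slice key1 none (some (PySem.Str.find key1 sep)))
  else none

-- loopA carries A's two accumulators (no_namespaces, namespaces); 'none' = one of A's raises
-- (the invalid-key Exception, or the 'raise <str>' — actually a TypeError — on a prefix mismatch).
def loopA (sep : String) (l : List (String × List (String × String)))
    (no_ns ns : List String) : Option (List String × List String) :=
  match l with
  | [] => some (no_ns, ns)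
  | (key, values) :: rest =>
    match keyResA key sep with
    | none => none
    | some key1 =>
      -- if 'prefix' in values: prefix_namespace = values['prefix']
      match (if (PySem.Dict.ofList values).contains "prefix" then (PySem.Dict.ofList values).get? "prefix" else none),
            nameA (PySem.Str.count key sep) key1 sep with
      | some p, some n => if p ≠ n then none else loopA sep rest no_ns (ns ++ [p])
      | some p, none => loopA sep rest no_ns (ns ++ [p])
      | none, some n => loopA sep rest no_ns (ns ++ [n])
      | none, none => loopA sep rest (no_ns ++ [key1]) ns

def get_namespaces (d : List (String × List (String × String))) (namespace_seperator : String) : List String :=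
  match loopA namespace_seperator (PySem.Dict.ofList d).items [] [] with
  | none => []                                   -- a raise inside the loop (outside Pre_)
  | some (_, ns) =>
    if PySem.List.len ns = 0 then List.replicate (PySem.Dict.ofList d).items.length ""
    else if PySem.List.len ns ≠ PySem.List.len (PySem.Dict.ofList d).items then []   -- the final raise (outside Pre_)
    else ns

-- ===== PORT B =====
-- _name(k, sep): the namespace encoded in a (valid) key name, or None
def nameB (k sep : String) : Option String :=
  if PySem.Str.count k sep = 0 then none
  else
    let k2 := if PySem.Str.count k sep = 2 then PySem.Str.slice k (some 1) none else k
    -- 'k2[:k2.find(sep)] or None'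
    if PySem.Str.slice k2 none (some (PySem.Str.find k2 sep)) = "" then none
    else some (PySem.Str.slice k2 none (some (PySem.Str.find k2 sep)))

def get_namespaces_alt (d : List (String × List (String × String))) (namespace_seperator : String) : List String :=
  let items := (PySem.Dict.ofList d).items
  let keys := items.map (·.1)
  -- bad = [k for k in keys if not (count<=1 or (count==2 and startswith))]
  let bad := keys.filter (fun k =>
    !(PySem.Str.count k namespace_seperator ≤ 1 ||
      (PySem.Str.count k namespace_seperator == 2 && PySem.Str.startswith k namespace_seperator)))
  if bad ≠ [] then []                            -- raise (outside Pre_)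
  else
    let names := keys.map (fun k => nameB k namespace_seperator)
    let prefixes := items.map (fun e => (PySem.Dict.ofList e.2).get? "prefix")
    -- clash = [(p,n) for p,n in zip(prefixes,names) if p is not None and n is not None and p != n]
    let clash := (prefixes.zip names).filter (fun pn => pn.1.isSome && pn.2.isSome && pn.1 != pn.2)
    if clash ≠ [] then []                        -- raise (outside Pre_)
    else
      let merged := (prefixes.zip names).map (fun pn => if pn.1.isNone then pn.2 else pn.1)
      if PySem.List.count merged none = merged.length then List.replicate merged.length ""
      else if (none : Option String) ∈ merged then []              -- the mixed-namespacing raise (outside Pre_)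
      else merged.map (fun o => o.getD "")

-- ===== PRECONDITION & SPEC =====
-- Pre_-side mirror of the per-key shape (independent of both ports):
-- the namespace encoded in the key name (with the ''-collapses-to-None rule).
def pvHead (key sep : String) : Option String :=
  if PySem.Str.slice key none (some (PySem.Str.find key sep)) = "" then none
  else some (PySem.Str.slice key none (some (PySem.Str.find key sep)))

def pvNameNs (sep key : String) : Option String :=
  if PySem.Str.count key sep = 0 then none
  else pvHead (if PySem.Str.count key sep = 2 then PySem.Str.slice key (some 1) none else key) sep

-- the combined per-key namespace: the prefix entry wins over the key-name one
def pvVal (sep : String) (e : String × List (String × String)) : Option String :=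
  match (PySem.Dict.ofList e.2).get? "prefix" with
  | some p => some p
  | none => pvNameNs sep e.1

-- Pre_ holds exactly when Python A returns normally: every key holds the separator 0, 1 or 2
-- times (twice only if leading), no prefix entry contradicts the key-name namespace, and either
-- no key or every key carries a namespace (A raises on every input violating one of these).
def Pre_get_namespaces (d : List (String × List (String × String))) (namespace_seperator : String) : Prop :=
  (∀ e ∈ (PySem.Dict.ofList d).items,
      PySem.Str.count e.1 namespace_seperator = 0 ∨ PySem.Str.count e.1 namespace_seperator = 1 ∨
        (PySem.Str.count e.1 namespace_seperator = 2 ∧ PySem.Str.find e.1 namespace_seperator = 0)) ∧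
  (∀ e ∈ (PySem.Dict.ofList d).items,
      (PySem.Dict.ofList e.2).get? "prefix" = none ∨ pvNameNs namespace_seperator e.1 = none ∨
        (PySem.Dict.ofList e.2).get? "prefix" = pvNameNs namespace_seperator e.1) ∧
  ((∀ e ∈ (PySem.Dict.ofList d).items, pvVal namespace_seperator e = none) ∨
   (∀ e ∈ (PySem.Dict.ofList d).items, pvVal namespace_seperator e ≠ none))

instance (d : List (String × List (String × String))) (namespace_seperator : String) : Decidable (Pre_get_namespaces d namespace_seperator) := by unfold Pre_get_namespaces; infer_instance

def pvWitness_get_namespaces : (List (String × List (String × String))) × String :=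
  ([("ns1/base", [("prefix", "ns1")]), ("ns2/arm", [])], "/")

def Spec_get_namespaces (d : List (String × List (String × String))) (namespace_seperator : String) (out : List String) : Prop := out = get_namespaces_alt d namespace_seperator
instance (d : List (String × List (String × String))) (namespace_seperator : String) (out : List String) : Decidable (Spec_get_namespaces d namespace_seperator out) := by unfold Spec_get_namespaces; infer_instance

-- ===== CLAIM (what is proved, stated in full; the proofs are below) =====
def Claim_equal_get_namespaces : Prop := ∀ (d : List (String × List (String × String))) (namespace_seperator : String), Dom_get_namespaces d namespace_seperator → Pre_get_namespaces d namespace_seperator → Spec_get_namespaces d namespace_seperator (get_namespaces d namespace_seperator)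

-- ===== LEMMAS AND PROOFS =====

-- per-key validity (the first Pre_ conjunct, as a local abbreviation for the lemmas)
def pvValid (sep key : String) : Prop :=
  PySem.Str.count key sep = 0 ∨ PySem.Str.count key sep = 1 ∨
    (PySem.Str.count key sep = 2 ∧ PySem.Str.find key sep = 0)

-- find s sub = 0 exactly when sub is a prefix of s (key_name.index(sep) == 0 vs startswith)
theorem pv_find_eq_zero_iff (s sub : List Char) :
    PySem.Chars.find s sub = 0 ↔ sub <+: s := by
  constructor
  · intro h
    have h0 : (0:Int) ≤ PySem.Chars.find s sub := le_of_eq h.symm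
    have := (PySem.Chars.find_spec h0).1
    rwa [h] at this
  · intro h
    have hin : sub <:+: s := h.isInfix
    have h0 : (0:Int) ≤ PySem.Chars.find s sub := (PySem.Chars.find_nonneg_iff s sub).mpr hin
    rcases lt_or_eq_of_le h0 with hlt | heq
    · exfalso
      have := (PySem.Chars.find_spec h0).2 0 (by omega)
      simp at this; exact this h
    · omega

theorem pv_find_zero_iff_startswith (key sep : String) :
    PySem.Str.find key sep = 0 ↔ PySem.Str.startswith key sep = true := by
  rw [PySem.Str.find_eq, PySem.Str.startswith_eq, PySem.Chars.startswith_iff]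
  exact pv_find_eq_zero_iff _ _

-- A's guarded prefix lookup is just get?
theorem pv_prefixA (values : List (String × String)) :
    (if (PySem.Dict.ofList values).contains "prefix" then (PySem.Dict.ofList values).get? "prefix"
     else none) = (PySem.Dict.ofList values).get? "prefix" := by
  rw [PySem.Dict.contains_eq_isSome_get?]
  cases (PySem.Dict.ofList values).get? "prefix" <;> simp

-- B's _name is the Pre_-side namespace of the key
theorem pv_nameB_eq (sep key : String) : nameB key sep = pvNameNs sep key := by
  unfold nameB pvNameNs pvHead
  rfl

-- under validity, A's key_name reassignment succeeds and equals the Pre_-side stripped key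
theorem pv_keyResA_eq (sep key : String) (h : pvValid sep key) :
    keyResA key sep =
      some (if PySem.Str.count key sep = 2 then PySem.Str.slice key (some 1) none else key) := by
  unfold pvValid at h
  unfold keyResA
  rcases h with h0 | h1 | ⟨h2, hf⟩
  · rw [if_neg (by omega), if_neg (by omega)]
  · rw [if_pos (by omega), if_pos h1, if_neg (by omega)]
  · rw [if_pos (by omega), if_neg (by omega), if_pos ⟨h2, hf⟩, if_pos h2]

-- A's name_namespace computed from the stripped key is the Pre_-side namespace of the key
theorem pv_nameA_eq (sep key : String) :
    nameA (PySem.Str.count key sep)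
      (if PySem.Str.count key sep = 2 then PySem.Str.slice key (some 1) none else key) sep =
      pvNameNs sep key := by
  unfold nameA pvNameNs pvHead
  by_cases h0 : PySem.Str.count key sep = 0
  · rw [if_neg (by omega), if_pos h0]
  · rw [if_pos (by omega), if_neg h0]

-- loopA returns, with namespaces = the pvVal values of the entries appended in order
theorem pv_loopA_eq (sep : String) (l : List (String × List (String × String)))
    (hv : ∀ e ∈ l, pvValid sep e.1)
    (hm : ∀ e ∈ l, (PySem.Dict.ofList e.2).get? "prefix" = none ∨ pvNameNs sep e.1 = none ∨
          (PySem.Dict.ofList e.2).get? "prefix" = pvNameNs sep e.1) :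
    ∀ no ns, ∃ no', loopA sep l no ns = some (no', ns ++ (l.map (pvVal sep)).reduceOption) := by
  induction l with
  | nil => intro no ns; exact ⟨no, by simp [loopA]⟩
  | cons e rest ih =>
    intro no ns
    obtain ⟨key, values⟩ := e
    have hvk := hv _ (List.mem_cons_self ..)
    have hmk := hm _ (List.mem_cons_self ..)
    have ihr := ih (fun e he => hv e (List.mem_cons_of_mem _ he))
      (fun e he => hm e (List.mem_cons_of_mem _ he))
    show ∃ no', loopA sep ((key, values) :: rest) no ns = _
    rw [loopA, pv_keyResA_eq sep key hvk, pv_prefixA values]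
    show ∃ no', (match (PySem.Dict.ofList values).get? "prefix",
        nameA (PySem.Str.count key sep)
          (if PySem.Str.count key sep = 2 then PySem.Str.slice key (some 1) none else key) sep with
      | some p, some n => if p ≠ n then none else loopA sep rest no (ns ++ [p])
      | some p, none => loopA sep rest no (ns ++ [p])
      | none, some n => loopA sep rest no (ns ++ [n])
      | none, none => loopA sep rest
          (no ++ [if PySem.Str.count key sep = 2 then PySem.Str.slice key (some 1) none else key]) ns) = _
    rw [pv_nameA_eq sep key]
    cases hp : (PySem.Dict.ofList values).get? "prefix" with
    | none =>
      cases hn : pvNameNs sep key with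
      | none =>
        show ∃ no', loopA sep rest
          (no ++ [if PySem.Str.count key sep = 2 then PySem.Str.slice key (some 1) none else key]) ns = _
        obtain ⟨no', h⟩ := ihr (no ++ [if PySem.Str.count key sep = 2 then PySem.Str.slice key (some 1) none else key]) ns
        exact ⟨no', by simp only [List.map_cons, pvVal, hp, hn, List.reduceOption_cons_of_none]; exact h⟩
      | some n =>
        show ∃ no', loopA sep rest no (ns ++ [n]) = _
        obtain ⟨no', h⟩ := ihr no (ns ++ [n])
        refine ⟨no', ?_⟩
        simp only [List.map_cons, pvVal, hp, hn, List.reduceOption_cons_of_some]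
        rw [h]; simp
    | some p =>
      cases hn : pvNameNs sep key with
      | none =>
        show ∃ no', loopA sep rest no (ns ++ [p]) = _
        obtain ⟨no', h⟩ := ihr no (ns ++ [p])
        refine ⟨no', ?_⟩
        simp only [List.map_cons, pvVal, hp, List.reduceOption_cons_of_some]
        rw [h]; simp
      | some n =>
        have hpn : p = n := by
          rcases hmk with h | h | h
          · rw [hp] at h; exact absurd h (by simp)
          · rw [hn] at h; exact absurd h (by simp)
          · rw [hp, hn] at h; exact Option.some.inj h
        show ∃ no', (if p ≠ n then none else loopA sep rest no (ns ++ [p])) = _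
        obtain ⟨no', h⟩ := ihr no (ns ++ [p])
        refine ⟨no', ?_⟩
        rw [if_neg (show ¬ p ≠ n by simp [hpn])]
        simp only [List.map_cons, pvVal, hp, List.reduceOption_cons_of_some]
        rw [h]; simp

-- an all-some option list reduces to its mapped defaults
theorem pv_reduceOption_all_some {m : List (Option String)} (h : ∀ x ∈ m, x ≠ none) :
    m.reduceOption = m.map (fun o => o.getD "") := by
  induction m with
  | nil => rfl
  | cons x t ih =>
    cases hx : x with
    | none => exact absurd hx (h x (List.mem_cons_self ..))
    | some v =>
      simp only [List.reduceOption_cons_of_some, List.map_cons, Option.getD_some]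
      exact congrArg _ (ih (fun y hy => h y (List.mem_cons_of_mem _ hy)))

theorem pv_reduceOption_all_none {m : List (Option String)} (h : ∀ x ∈ m, x = none) :
    m.reduceOption = [] := by
  induction m with
  | nil => rfl
  | cons x t ih =>
    rw [h x (List.mem_cons_self ..), List.reduceOption_cons_of_none]
    exact ih (fun y hy => h y (List.mem_cons_of_mem _ hy))

-- under Pre_'s per-key conjuncts, B's staged passes produce merged = map pvVal with no bad key / clash
theorem pv_bad_nil (sep : String) (l : List (String × List (String × String)))
    (hv : ∀ e ∈ l, pvValid sep e.1) :
    (l.map (·.1)).filter (fun k =>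
      !(PySem.Str.count k sep ≤ 1 || (PySem.Str.count k sep == 2 && PySem.Str.startswith k sep))) = [] := by
  rw [List.filter_eq_nil_iff]
  intro k hk
  obtain ⟨e, he, rfl⟩ := List.mem_map.mp hk
  rcases hv e he with h | h | ⟨h2, hf⟩
  · rw [PySem.Str.count_eq] at h; simp [h]
  · rw [PySem.Str.count_eq] at h; simp [h]
  · have hs := (pv_find_zero_iff_startswith e.1 sep).mp hf
    rw [PySem.Str.count_eq] at h2
    rw [PySem.Str.startswith_eq] at hs
    simp [h2, hs]

theorem pv_zip_map_eq (sep : String) (l : List (String × List (String × String))) :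
    (l.map (fun e => (PySem.Dict.ofList e.2).get? "prefix")).zip
      ((l.map (·.1)).map (fun k => nameB k sep)) =
    l.map (fun e => ((PySem.Dict.ofList e.2).get? "prefix", pvNameNs sep e.1)) := by
  rw [List.map_map]
  rw [List.zip_map']
  refine List.map_congr_left ?_
  intro e _
  simp [Function.comp, pv_nameB_eq]

theorem pv_clash_nil (sep : String) (l : List (String × List (String × String)))
    (hm : ∀ e ∈ l, (PySem.Dict.ofList e.2).get? "prefix" = none ∨ pvNameNs sep e.1 = none ∨
          (PySem.Dict.ofList e.2).get? "prefix" = pvNameNs sep e.1) :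
    (l.map (fun e => ((PySem.Dict.ofList e.2).get? "prefix", pvNameNs sep e.1))).filter
      (fun pn => pn.1.isSome && pn.2.isSome && pn.1 != pn.2) = [] := by
  rw [List.filter_eq_nil_iff]
  intro pn hpn
  obtain ⟨e, he, rfl⟩ := List.mem_map.mp hpn
  rcases hm e he with h | h | h <;> simp [h]

theorem pv_merged_eq (sep : String) (l : List (String × List (String × String))) :
    (l.map (fun e => ((PySem.Dict.ofList e.2).get? "prefix", pvNameNs sep e.1))).map
      (fun pn => if pn.1.isNone then pn.2 else pn.1) = l.map (pvVal sep) := by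
  rw [List.map_map]
  refine List.map_congr_left ?_
  intro e _
  cases hp : (PySem.Dict.ofList e.2).get? "prefix" <;> simp [Function.comp, pvVal, hp]

-- ===== VERDICT (by name: the statement is the Claim_ definition above) =====
theorem get_namespaces_spec : Claim_equal_get_namespaces := by
  intro d sep _ hpre
  obtain ⟨hv, hm, hom⟩ := hpre
  show get_namespaces d sep = get_namespaces_alt d sep
  obtain ⟨no', hA⟩ := pv_loopA_eq sep (PySem.Dict.ofList d).items hv hm [] []
  rw [get_namespaces, hA]
  simp only [get_namespaces_alt]
  set l := (PySem.Dict.ofList d).items with hl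
  simp only [pv_bad_nil sep l hv, pv_zip_map_eq sep l, pv_clash_nil sep l hm, pv_merged_eq sep l,
    ne_eq, not_true_eq_false, if_false, List.nil_append]
  rcases hom with hall | hsome
  · -- every entry unnamespaced: both return replicate
    have hred : (l.map (pvVal sep)).reduceOption = [] := by
      refine pv_reduceOption_all_none ?_
      intro x hx
      obtain ⟨e, he, rfl⟩ := List.mem_map.mp hx
      exact hall e he
    have hcnt : PySem.List.count (l.map (pvVal sep)) none = (l.map (pvVal sep)).length := by
      rw [PySem.List.count_eq, List.count_eq_length]
      intro x hx
      obtain ⟨e, he, rfl⟩ := List.mem_map.mp hx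
      exact (hall e he).symm
    rw [PySem.List.count_eq] at hcnt
    simp only [List.length_map] at hcnt
    simp [hred, hcnt]
  · -- every entry namespaced
    have hns : ∀ x ∈ l.map (pvVal sep), x ≠ none := by
      intro x hx
      obtain ⟨e, he, rfl⟩ := List.mem_map.mp hx
      exact hsome e he
    have hred := pv_reduceOption_all_some hns
    have hlen : (l.map (pvVal sep)).reduceOption.length = l.length := by
      rw [hred]; simp
    by_cases hl0 : l = []
    · rw [hl0]; simp
    · have hne : (l.map (pvVal sep)).reduceOption.length ≠ 0 := by
        rw [hlen]; exact fun h => hl0 (List.length_eq_zero_iff.mp h)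
      have hnm : none ∉ l.map (pvVal sep) := fun h => hns none h rfl
      have hcnt : PySem.List.count (l.map (pvVal sep)) none ≠ (l.map (pvVal sep)).length := by
        rw [PySem.List.count_eq, List.count_eq_zero_of_not_mem hnm]
        intro h
        exact hl0 (List.length_eq_zero_iff.mp (by simpa using h.symm))
      simp only [PySem.List.len_eq, hcnt, if_false, hnm]
      rw [if_neg (by exact_mod_cast hne), if_neg (by rw [hlen]; simp), hred]
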